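-- pv_equiv track=rewrite | github.com/doocs/leetcode | solution/3000-3099/3018.Maximum Number of Removal Queries That Can Be Processed I/Solution.py | maximumProcessableQueries
-- ===== SOURCE A (Python) =====
-- from typing import List
--
-- def maximumProcessableQueries(nums: List[int], queries: List[int]) -> int:
--     n = len(nums)
--     f = [[0] * n for _ in range(n)]
--     m = len(queries)
--     for i in range(n):
--         for j in range(n - 1, i - 1, -1):
--             if i:
--                 f[i][j] = max(
--                     f[i][j], f[i - 1][j] + (nums[i - 1] >= queries[f[i - 1][j]])
--                 )
--             if j + 1 < n:
--                 f[i][j] = max(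
--                     f[i][j], f[i][j + 1] + (nums[j + 1] >= queries[f[i][j + 1]])
--                 )
--             if f[i][j] == m:
--                 return m
--     return max(f[i][i] + (nums[i] >= queries[f[i][i]]) for i in range(n))
-- ===== SOURCE B (Python) =====
-- from typing import List
--
--
-- def maximumProcessableQueries(nums: List[int], queries: List[int]) -> int:
--     # Top-down memoized recursion over states (i, j) = remaining subarray nums[i..j];
--     # the transition is capped at m, so queries[m] is never indexed and an m-value
--     # simply propagates to the diagonal (no early exit, no 2D table fill order).
--     n, m = len(nums), len(queries)
--
--     def step(v: int, x: int) -> int: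
--         return m if v >= m else v + (x >= queries[v])
--
--     memo = {}
--
--     def g(i: int, j: int) -> int:
--         if (i, j) in memo:
--             return memo[(i, j)]
--         up = step(g(i - 1, j), nums[i - 1]) if i else 0
--         right = step(g(i, j + 1), nums[j + 1]) if j + 1 < n else 0
--         val = max(up, right)
--         memo[(i, j)] = val
--         return val
--
--     return max(step(g(i, i), nums[i]) for i in range(n))
-- ===== Notes on version B (the rewrite author's own statement) =====
-- stated objective: alternative
-- what changed: Replaces A's bottom-up in-place n-by-n table fill with an early 'return m' by a top-down dict-memoized recursion g(i,j) whose transition is capped at m (the cap propagates an m-value to the diagonal, so no early exit and no table fill order are needed).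
import Mathlib
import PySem

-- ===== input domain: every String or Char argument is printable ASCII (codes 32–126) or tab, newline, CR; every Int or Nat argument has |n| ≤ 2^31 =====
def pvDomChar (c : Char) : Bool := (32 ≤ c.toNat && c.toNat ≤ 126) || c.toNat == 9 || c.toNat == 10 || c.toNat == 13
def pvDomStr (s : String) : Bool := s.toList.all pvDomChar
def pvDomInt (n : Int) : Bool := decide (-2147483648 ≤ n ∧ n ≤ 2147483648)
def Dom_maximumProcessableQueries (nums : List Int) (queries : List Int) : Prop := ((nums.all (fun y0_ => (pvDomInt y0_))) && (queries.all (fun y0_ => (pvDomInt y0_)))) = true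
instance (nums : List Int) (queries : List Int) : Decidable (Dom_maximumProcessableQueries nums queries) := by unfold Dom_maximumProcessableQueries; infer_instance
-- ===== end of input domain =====

-- B replaces A's bottom-up in-place n×n table fill with early 'return m' by a top-down
-- dict-memoized recursion over (i, j) whose transition is capped at m (alternative decomposition).


-- ===== PORT A =====
-- inner loop: j runs from n-1 down to i, f[i][j] is updated twice, 'return m' is modelled as .error m
def innerA (nums queries : List Int) (n : Nat) (m : Int) (i j : Nat) (f : List (List Int)) :
    Except Int (List (List Int)) :=
  let fi := f.getD i []
  let v0 := fi.getD j 0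
  let v1 := if i ≠ 0 then
      let p := (f.getD (i-1) []).getD j 0
      max v0 (p + (if nums.getD (i-1) 0 ≥ queries.getD p.toNat 0 then (1:Int) else 0))
    else v0
  let v2 := if j + 1 < n then
      let q := fi.getD (j+1) 0
      max v1 (q + (if nums.getD (j+1) 0 ≥ queries.getD q.toNat 0 then (1:Int) else 0))
    else v1
  let f' := f.set i (fi.set j v2)
  if v2 = m then .error m
  else if h : i < j then innerA nums queries n m i (j-1) f'
  else .ok f'
termination_by j
decreasing_by omega

-- outer loop over i = 0 .. n-1
def outerA (nums queries : List Int) (n : Nat) (m : Int) (i : Nat) (f : List (List Int)) :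
    Except Int (List (List Int)) :=
  if _h : i < n then
    match innerA nums queries n m i (n-1) f with
    | .error e => .error e
    | .ok f' => outerA nums queries n m (i+1) f'
  else .ok f
termination_by n - i
decreasing_by omega

def maximumProcessableQueries (nums : List Int) (queries : List Int) : Int :=
  let n := nums.length
  let m := (queries.length : Int)
  let f0 := List.replicate n (List.replicate n (0:Int))
  match outerA nums queries n m 0 f0 with
  | .error r => r
  | .ok f =>
      (((List.range n).map (fun i =>
          let v := (f.getD i []).getD i 0
          v + (if nums.getD i 0 ≥ queries.getD v.toNat 0 then (1:Int) else 0))).max?).getD 0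

-- ===== PORT B =====
-- capped transition of Source B: 'm if v >= m else v + (x >= queries[v])'
def stepB (queries : List Int) (m v x : Int) : Int :=
  if v ≥ m then m else v + (if x ≥ queries.getD v.toNat 0 then (1:Int) else 0)

-- Source B's memoized recursion g(i, j); the memo dict is threaded through explicitly
def gB (nums queries : List Int) (n : Nat) (m : Int) (i j : Nat)
    (memo : PySem.Dict (Nat × Nat) Int) : PySem.Dict (Nat × Nat) Int × Int :=
  match memo.get? (i, j) with
  | some v => (memo, v)
  | none =>
    let p1 : PySem.Dict (Nat × Nat) Int × Int :=
      if _h : i ≠ 0 then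
        let r := gB nums queries n m (i-1) j memo
        (r.1, stepB queries m r.2 (nums.getD (i-1) 0))
      else (memo, 0)
    let p2 : PySem.Dict (Nat × Nat) Int × Int :=
      if _h : j + 1 < n then
        let r := gB nums queries n m i (j+1) p1.1
        (r.1, stepB queries m r.2 (nums.getD (j+1) 0))
      else (p1.1, 0)
    (p2.1.insert (i, j) (max p1.2 p2.2), max p1.2 p2.2)
termination_by (i, n - j)
decreasing_by
  · exact Prod.Lex.left _ _ (by omega)
  · exact Prod.Lex.right _ (by omega)

-- the final line of Source B: max over i of step(g(i, i), nums[i]), one shared memo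
def diagB (nums queries : List Int) (n : Nat) (m : Int) : List Int × PySem.Dict (Nat × Nat) Int :=
  (List.range n).foldl (fun acc i =>
      let r := gB nums queries n m i i acc.2
      (acc.1 ++ [stepB queries m r.2 (nums.getD i 0)], r.1))
    ([], PySem.Dict.empty)

def maximumProcessableQueries_alt (nums : List Int) (queries : List Int) : Int :=
  let n := nums.length
  let m := (queries.length : Int)
  (((diagB nums queries n m).1).max?).getD 0

-- ===== PRECONDITION & SPEC =====
-- Pre_ excludes exactly nums = [], on which Python A raises ValueError (max() of an empty generator); B raises there too.
def Pre_maximumProcessableQueries (nums : List Int) (queries : List Int) : Prop := nums ≠ []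
instance (nums : List Int) (queries : List Int) : Decidable (Pre_maximumProcessableQueries nums queries) := by
  unfold Pre_maximumProcessableQueries; infer_instance

def pvWitness_maximumProcessableQueries : List Int × List Int := ([2, 1], [1, 2])

def Spec_maximumProcessableQueries (nums : List Int) (queries : List Int) (out : Int) : Prop :=
  out = maximumProcessableQueries_alt nums queries
instance (nums : List Int) (queries : List Int) (out : Int) : Decidable (Spec_maximumProcessableQueries nums queries out) := by
  unfold Spec_maximumProcessableQueries; infer_instance

-- ===== CLAIM (what is proved, stated in full; the proofs are below) =====
def Claim_equal_maximumProcessableQueries : Prop := ∀ (nums : List Int) (queries : List Int), Dom_maximumProcessableQueries nums queries → Pre_maximumProcessableQueries nums queries → Spec_maximumProcessableQueries nums queries (maximumProcessableQueries nums queries)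

-- ===== LEMMAS AND PROOFS =====

-- the mathematical DP value both programs compute at cell (i, j)
def Fdp (nums queries : List Int) (n : Nat) (m : Int) (i j : Nat) : Int :=
  let up := if i ≠ 0 then stepB queries m (Fdp nums queries n m (i-1) j) (nums.getD (i-1) 0) else 0
  let right := if _h : j + 1 < n then stepB queries m (Fdp nums queries n m i (j+1)) (nums.getD (j+1) 0) else 0
  max up right
termination_by (i, n - j)
decreasing_by · omega
              · omega

lemma stepB_nonneg {queries : List Int} {m v x : Int} (hm : 0 ≤ m) (_hv : 0 ≤ v) :
    0 ≤ stepB queries m v x := by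
  unfold stepB; split_ifs <;> omega
lemma stepB_le {queries : List Int} {m v x : Int} (hv : v ≤ m) :
    stepB queries m v x ≤ m := by
  unfold stepB; split_ifs <;> omega

lemma Fdp_nonneg (nums queries : List Int) (n : Nat) (m : Int) (hm : 0 ≤ m) (i j : Nat) :
    0 ≤ Fdp nums queries n m i j := by
  induction i, j using Fdp.induct nums queries n m with
  | _ i j ih1 ih2 =>
    rw [Fdp]
    refine le_max_iff.mpr (Or.inr ?_)
    split_ifs with h
    · exact stepB_nonneg hm (ih2 h)
    · exact le_refl 0
lemma stepB_ge {queries : List Int} {m v x : Int} (hv : v ≤ m) :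
    v ≤ stepB queries m v x := by
  unfold stepB; split_ifs <;> omega
lemma Fdp_le (nums queries : List Int) (n : Nat) (m : Int) (hm : 0 ≤ m) (i j : Nat) :
    Fdp nums queries n m i j ≤ m := by
  induction i, j using Fdp.induct nums queries n m with
  | _ i j ih1 ih2 =>
    rw [Fdp]
    refine max_le ?_ ?_
    · split_ifs with h
      · exact stepB_le (ih1 h)
      · exact hm
    · split_ifs with h
      · exact stepB_le (ih2 h)
      · exact hm
lemma Fdp_succ_le (nums queries : List Int) (n : Nat) (m : Int) (hm : 0 ≤ m) (i j : Nat)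
    (hj : j + 1 < n) :
    Fdp nums queries n m i (j+1) ≤ Fdp nums queries n m i j := by
  calc Fdp nums queries n m i (j+1)
      ≤ stepB queries m (Fdp nums queries n m i (j+1)) (nums.getD (j+1) 0) :=
        stepB_ge (Fdp_le nums queries n m hm i (j+1))
    _ ≤ Fdp nums queries n m i j := by
        conv_rhs => rw [Fdp]
        rw [dif_pos hj]
        exact le_max_right _ _
lemma Fdp_diag_ge (nums queries : List Int) (n : Nat) (m : Int) (hm : 0 ≤ m) (i j : Nat)
    (hij : i ≤ j) (hj : j < n) :
    Fdp nums queries n m i j ≤ Fdp nums queries n m i i := by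
  obtain ⟨d, rfl⟩ : ∃ d, j = i + d := ⟨j - i, by omega⟩
  clear hij
  induction d with
  | zero => exact le_refl _
  | succ d ih =>
    have h1 : i + d + 1 < n := by omega
    calc Fdp nums queries n m i (i + (d+1)) = Fdp nums queries n m i ((i+d)+1) := by ring_nf
      _ ≤ Fdp nums queries n m i (i+d) := Fdp_succ_le nums queries n m hm i (i+d) (by omega)
      _ ≤ Fdp nums queries n m i i := ih (by omega)

-- ===== B-side: the memoized recursion computes Fdp =====

-- invariant of the memo dict: every stored value is the DP value of its key
def MemoOK (nums queries : List Int) (n : Nat) (m : Int) (memo : PySem.Dict (Nat × Nat) Int) : Prop :=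
  ∀ a b v, memo.get? (a, b) = some v → v = Fdp nums queries n m a b

lemma gB_spec (nums queries : List Int) (n : Nat) (m : Int) :
    ∀ K i j memo, i + (n - j) ≤ K → MemoOK nums queries n m memo →
    (gB nums queries n m i j memo).2 = Fdp nums queries n m i j ∧
    MemoOK nums queries n m (gB nums queries n m i j memo).1 := by
  intro K
  induction K with
  | zero =>
    intro i j memo hK hmem
    rw [gB]
    cases hg : memo.get? (i, j) with
    | some v => exact ⟨hmem i j v hg, hmem⟩
    | none =>
      have hi0 : i = 0 := by omega
      have hjn : ¬ (j + 1 < n) := by omega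
      subst hi0
      simp only [dif_neg hjn, dif_neg (show ¬ ((0:Nat) ≠ 0) by simp)]
      constructor
      · rw [Fdp]
        simp [hjn]
      · intro a b v hv
        rw [PySem.Dict.get?_insert] at hv
        split_ifs at hv with hab
        · cases hv
          rw [Prod.mk.injEq] at hab
          rw [hab.1, hab.2, Fdp]
          simp [hjn]
        · exact hmem a b v hv
  | succ K ih =>
    intro i j memo hK hmem
    rw [gB]
    cases hg : memo.get? (i, j) with
    | some v => exact ⟨hmem i j v hg, hmem⟩
    | none =>
      by_cases hi : i ≠ 0
      · by_cases hj : j + 1 < n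
        · obtain ⟨h1v, h1m⟩ := ih (i-1) j memo (by omega) hmem
          obtain ⟨h2v, h2m⟩ := ih i (j+1) (gB nums queries n m (i-1) j memo).1 (by omega) h1m
          simp only [dif_pos hi, dif_pos hj]
          refine ⟨?_, ?_⟩
          · rw [h1v, h2v]
            conv_rhs => rw [Fdp]
            simp [hi, hj]
          · intro a b v hv
            rw [PySem.Dict.get?_insert] at hv
            split_ifs at hv with hab
            · cases hv
              rw [Prod.mk.injEq] at hab
              rw [hab.1, hab.2, h1v, h2v]
              conv_rhs => rw [Fdp]
              simp [hi, hj]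
            · exact h2m a b v hv
        · obtain ⟨h1v, h1m⟩ := ih (i-1) j memo (by omega) hmem
          simp only [dif_pos hi, dif_neg hj]
          refine ⟨?_, ?_⟩
          · rw [h1v]
            conv_rhs => rw [Fdp]
            simp [hi, hj]
          · intro a b v hv
            rw [PySem.Dict.get?_insert] at hv
            split_ifs at hv with hab
            · cases hv
              rw [Prod.mk.injEq] at hab
              rw [hab.1, hab.2, h1v]
              conv_rhs => rw [Fdp]
              simp [hi, hj]
            · exact h1m a b v hv
      · by_cases hj : j + 1 < n
        · obtain ⟨h2v, h2m⟩ := ih i (j+1) memo (by omega) hmem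
          simp only [dif_neg hi, dif_pos hj]
          refine ⟨?_, ?_⟩
          · rw [h2v]
            conv_rhs => rw [Fdp]
            simp [hi, hj]
          · intro a b v hv
            rw [PySem.Dict.get?_insert] at hv
            split_ifs at hv with hab
            · cases hv
              rw [Prod.mk.injEq] at hab
              rw [hab.1, hab.2, h2v]
              conv_rhs => rw [Fdp]
              simp [hi, hj]
            · exact h2m a b v hv
        · simp only [dif_neg hi, dif_neg hj]
          refine ⟨?_, ?_⟩
          · rw [Fdp]
            simp [hi, hj]
          · intro a b v hv
            rw [PySem.Dict.get?_insert] at hv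
            split_ifs at hv with hab
            · cases hv
              rw [Prod.mk.injEq] at hab
              rw [hab.1, hab.2, Fdp]
              simp [hi, hj]
            · exact hmem a b v hv

lemma diagB_fold_spec (nums queries : List Int) (n : Nat) (m : Int) :
    ∀ (l : List Nat) acc memo, MemoOK nums queries n m memo →
    (l.foldl (fun acc i =>
        let r := gB nums queries n m i i acc.2
        (acc.1 ++ [stepB queries m r.2 (nums.getD i 0)], r.1)) (acc, memo)).1
      = acc ++ l.map (fun i => stepB queries m (Fdp nums queries n m i i) (nums.getD i 0)) := by
  intro l
  induction l with
  | nil => intro acc memo _; simp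
  | cons x xs ih =>
    intro acc memo hmem
    obtain ⟨hv, hm'⟩ := gB_spec nums queries n m (x + (n - x)) x x memo (le_refl _) hmem
    simp only [List.foldl_cons, List.map_cons]
    have := ih (acc ++ [stepB queries m (Fdp nums queries n m x x) (nums.getD x 0)])
      (gB nums queries n m x x memo).1 hm'
    simp only [hv] at this ⊢
    rw [this]
    simp

lemma alt_eq_Fdp (nums queries : List Int) :
    maximumProcessableQueries_alt nums queries
      = (((List.range nums.length).map (fun i =>
          stepB queries (queries.length : Int)
            (Fdp nums queries nums.length (queries.length : Int) i i)
            (nums.getD i 0))).max?).getD 0 := by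
  unfold maximumProcessableQueries_alt diagB
  have h := diagB_fold_spec nums queries nums.length (queries.length : Int)
    (List.range nums.length) [] PySem.Dict.empty
    (fun a b v hv => by rw [PySem.Dict.get?_empty] at hv; cases hv)
  simp only [List.nil_append] at h
  show ((List.foldl (fun acc i =>
        (acc.1 ++ [stepB queries (queries.length : Int)
            (gB nums queries nums.length (queries.length : Int) i i acc.2).2 (nums.getD i 0)],
          (gB nums queries nums.length (queries.length : Int) i i acc.2).1))
      ([], PySem.Dict.empty) (List.range nums.length)).1.max?).getD 0 = _
  rw [h]

-- ===== A-side: loop invariant of the in-place table =====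

def doneCell (i j i' j' : Nat) : Bool := (decide (i' < i) && decide (i' ≤ j')) || (i' == i && decide (j < j'))

def AInv (nums queries : List Int) (n : Nat) (m : Int) (i j : Nat) (f : List (List Int)) : Prop :=
  f.length = n ∧ (∀ r ∈ f, r.length = n) ∧
  (∀ i' j', i' < n → j' < n →
    (f.getD i' []).getD j' 0 = if doneCell i j i' j' then Fdp nums queries n m i' j' else 0) ∧
  (∀ i' j', i' < n → j' < n → doneCell i j i' j' → Fdp nums queries n m i' j' < m)

lemma set_getD {α : Type} (l : List α) (a b : Nat) (v d : α) (h : a < l.length) :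
    (l.set a v).getD b d = if a = b then v else l.getD b d := by
  conv_lhs => rw [List.getD_eq_getElem?_getD, List.getElem?_set]
  by_cases hab : a = b
  · rw [if_pos hab, if_pos (show a < l.length from h), Option.getD_some, if_pos hab]
  · rw [if_neg hab, if_neg hab, ← List.getD_eq_getElem?_getD]

lemma mat_set_get (f : List (List Int)) (i j i' j' : Nat) (v : Int)
    (hi : i < f.length) (hj : j < (f.getD i []).length) :
    ((f.set i ((f.getD i []).set j v)).getD i' []).getD j' 0
      = if i' = i ∧ j' = j then v else (f.getD i' []).getD j' 0 := by
  rw [set_getD f i i' _ [] hi]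
  by_cases hii : i = i'
  · rw [if_pos hii, set_getD _ j j' v 0 hj]
    by_cases hjj : j = j'
    · rw [if_pos hjj, if_pos ⟨hii.symm, hjj.symm⟩]
    · rw [if_neg hjj, if_neg (fun hc => hjj hc.2.symm), hii]
  · rw [if_neg hii, if_neg (fun hc => hii hc.1.symm)]

lemma stepB_eq_add {queries : List Int} {m v x : Int} (h : v < m) :
    stepB queries m v x = v + (if x ≥ queries.getD v.toNat 0 then (1:Int) else 0) := by
  unfold stepB; rw [if_neg (by omega)]

lemma innerA_step (nums queries : List Int) (n : Nat) (m : Int) (hm : 0 ≤ m) (i j : Nat)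
    (f : List (List Int)) (hin : i < n) (hij : i ≤ j) (hjn : j < n)
    (hinv : AInv nums queries n m i j f) :
    innerA nums queries n m i j f
      = (if Fdp nums queries n m i j = m then Except.error m
         else if _h : i < j then innerA nums queries n m i (j-1)
             (f.set i ((f.getD i []).set j (Fdp nums queries n m i j)))
         else .ok (f.set i ((f.getD i []).set j (Fdp nums queries n m i j)))) := by
  obtain ⟨hlen, hrows, hget, hlt⟩ := hinv
  have hv0 : (f.getD i []).getD j 0 = 0 := by
    rw [hget i j hin hjn]
    have : doneCell i j i j = false := by simp [doneCell]
    rw [this]; rfl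
  have hup : (if i ≠ 0 then
        max ((f.getD i []).getD j 0)
          (((f.getD (i-1) []).getD j 0) +
            (if nums.getD (i-1) 0 ≥ queries.getD ((f.getD (i-1) []).getD j 0).toNat 0 then (1:Int) else 0))
      else (f.getD i []).getD j 0)
      = max 0 (if i ≠ 0 then stepB queries m (Fdp nums queries n m (i-1) j) (nums.getD (i-1) 0) else 0) := by
    by_cases hi0 : i = 0
    · rw [if_neg (by omega), if_neg (by omega), hv0]
      simp
    · have hdone : doneCell i j (i-1) j = true := by simp [doneCell]; omega
      have hp : (f.getD (i-1) []).getD j 0 = Fdp nums queries n m (i-1) j := by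
        rw [hget (i-1) j (by omega) hjn, hdone]; rfl
      have hplt : Fdp nums queries n m (i-1) j < m := hlt (i-1) j (by omega) hjn hdone
      rw [if_pos hi0, if_pos hi0, hv0, hp, stepB_eq_add hplt]
  have hv2 : (if j + 1 < n then
        max (max 0 (if i ≠ 0 then stepB queries m (Fdp nums queries n m (i-1) j) (nums.getD (i-1) 0) else 0))
          (((f.getD i []).getD (j+1) 0) +
            (if nums.getD (j+1) 0 ≥ queries.getD ((f.getD i []).getD (j+1) 0).toNat 0 then (1:Int) else 0))
      else max 0 (if i ≠ 0 then stepB queries m (Fdp nums queries n m (i-1) j) (nums.getD (i-1) 0) else 0))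
      = Fdp nums queries n m i j := by
    have hupge : (0:Int) ≤ (if i ≠ 0 then stepB queries m (Fdp nums queries n m (i-1) j) (nums.getD (i-1) 0) else 0) := by
      split_ifs with h
      · exact stepB_nonneg hm (Fdp_nonneg nums queries n m hm (i-1) j)
      · exact le_refl 0
    conv_rhs => rw [Fdp]
    by_cases hj1 : j + 1 < n
    · have hdone : doneCell i j i (j+1) = true := by simp [doneCell]
      have hq : (f.getD i []).getD (j+1) 0 = Fdp nums queries n m i (j+1) := by
        rw [hget i (j+1) hin hj1, hdone]; rfl
      have hqlt : Fdp nums queries n m i (j+1) < m := hlt i (j+1) hin hj1 hdone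
      rw [if_pos hj1, dif_pos hj1, hq, stepB_eq_add hqlt, ← stepB_eq_add hqlt]
      omega
    · rw [if_neg hj1, dif_neg hj1]
      omega
  conv_lhs => rw [innerA]
  rw [hv0] at hup ⊢
  rw [hup, hv2]

lemma doneCell_succ (i j i' j' : Nat) (hij : i < j) :
    (doneCell i (j-1) i' j' = true) ↔ (doneCell i j i' j' = true ∨ (i' = i ∧ j' = j)) := by
  simp [doneCell]; omega

lemma doneCell_next (i n i' j' : Nat) (hin : i < n) (hj : j' < n) :
    (doneCell (i+1) (n-1) i' j' = true) ↔ (doneCell i i i' j' = true ∨ (i' = i ∧ j' = i)) := by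
  simp [doneCell]; omega

lemma AInv_set (nums queries : List Int) (n : Nat) (m : Int) (i j : Nat)
    (f : List (List Int)) (hin : i < n) (hij : i ≤ j) (hjn : j < n)
    (hinv : AInv nums queries n m i j f) (hvlt : Fdp nums queries n m i j < m) :
    let f' := f.set i ((f.getD i []).set j (Fdp nums queries n m i j))
    f'.length = n ∧ (∀ r ∈ f', r.length = n) ∧
    (∀ i' j', i' < n → j' < n →
      (f'.getD i' []).getD j' 0 =
        if (doneCell i j i' j' || (decide (i' = i) && decide (j' = j))) then Fdp nums queries n m i' j' else 0) ∧
    (∀ i' j', i' < n → j' < n → (doneCell i j i' j' || (decide (i' = i) && decide (j' = j))) = true →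
      Fdp nums queries n m i' j' < m) := by
  obtain ⟨hlen, hrows, hget, hlt⟩ := hinv
  have hfi_len : (f.getD i []).length = n := by
    rw [List.getD_eq_getElem?_getD, List.getElem?_eq_getElem (by omega)]
    exact hrows _ (List.getElem_mem (by omega))
  refine ⟨by simp [hlen], ?_, ?_, ?_⟩
  · intro r hr
    rcases List.mem_or_eq_of_mem_set hr with h | h
    · exact hrows r h
    · rw [h, List.length_set]
      exact hfi_len
  · intro i' j' hi' hj'
    rw [mat_set_get f i j i' j' _ (by omega) (by omega)]
    by_cases hc : i' = i ∧ j' = j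
    · rw [if_pos hc, if_pos (by simp [hc])]
      rw [hc.1, hc.2]
    · rw [if_neg hc, hget i' j' hi' hj']
      have : (doneCell i j i' j' || (decide (i' = i) && decide (j' = j))) = doneCell i j i' j' := by
        have : ¬ (decide (i' = i) && decide (j' = j)) = true := by simp; tauto
        simp at this ⊢
        tauto
      rw [this]
  · intro i' j' hi' hj' hc
    simp only [Bool.or_eq_true, Bool.and_eq_true, decide_eq_true_eq] at hc
    rcases hc with hc | ⟨h1, h2⟩
    · exact hlt i' j' hi' hj' hc
    · rw [h1, h2]; exact hvlt

lemma innerA_spec (nums queries : List Int) (n : Nat) (m : Int) (hm : 0 ≤ m) (i : Nat)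
    (hin : i < n) :
    ∀ d j f, j - i = d → i ≤ j → j < n → AInv nums queries n m i j f →
    (∃ f', innerA nums queries n m i j f = .ok f' ∧ AInv nums queries n m (i+1) (n-1) f')
    ∨ (innerA nums queries n m i j f = .error m
        ∧ ∃ i0 j0, i0 < n ∧ i0 ≤ j0 ∧ j0 < n ∧ Fdp nums queries n m i0 j0 = m) := by
  intro d
  induction d with
  | zero =>
    intro j f hd hij hjn hinv
    have hji : j = i := by omega
    subst hji
    rw [innerA_step nums queries n m hm j j f hin (le_refl j) hjn hinv]
    by_cases hFm : Fdp nums queries n m j j = m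
    · rw [if_pos hFm]
      exact Or.inr ⟨rfl, j, j, hin, le_refl j, hjn, hFm⟩
    · rw [if_neg hFm, dif_neg (by omega)]
      have hvlt : Fdp nums queries n m j j < m :=
        lt_of_le_of_ne (Fdp_le nums queries n m hm j j) hFm
      obtain ⟨h1, h2, h3, h4⟩ := AInv_set nums queries n m j j f hin (le_refl j) hjn hinv hvlt
      refine Or.inl ⟨_, rfl, h1, h2, ?_, ?_⟩
      · intro i' j' hi' hj'
        rw [h3 i' j' hi' hj']
        have : (doneCell j j i' j' || (decide (i' = j) && decide (j' = j)))
            = doneCell (j+1) (n-1) i' j' := by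
          rw [Bool.eq_iff_iff]
          simp only [Bool.or_eq_true, Bool.and_eq_true, decide_eq_true_eq]
          rw [doneCell_next j n i' j' hin hj']
        rw [this]
      · intro i' j' hi' hj' hc
        refine h4 i' j' hi' hj' ?_
        simp only [Bool.or_eq_true, Bool.and_eq_true, decide_eq_true_eq]
        rw [doneCell_next j n i' j' hin hj'] at hc
        tauto
  | succ d ih =>
    intro j f hd hij hjn hinv
    have hilj : i < j := by omega
    rw [innerA_step nums queries n m hm i j f hin hij hjn hinv]
    by_cases hFm : Fdp nums queries n m i j = m
    · rw [if_pos hFm]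
      exact Or.inr ⟨rfl, i, j, hin, hij, hjn, hFm⟩
    · rw [if_neg hFm, dif_pos hilj]
      have hvlt : Fdp nums queries n m i j < m :=
        lt_of_le_of_ne (Fdp_le nums queries n m hm i j) hFm
      obtain ⟨h1, h2, h3, h4⟩ := AInv_set nums queries n m i j f hin hij hjn hinv hvlt
      refine ih (j-1) _ (by omega) (by omega) (by omega) ⟨h1, h2, ?_, ?_⟩
      · intro i' j' hi' hj'
        rw [h3 i' j' hi' hj']
        have : (doneCell i j i' j' || (decide (i' = i) && decide (j' = j)))
            = doneCell i (j-1) i' j' := by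
          rw [Bool.eq_iff_iff]
          simp only [Bool.or_eq_true, Bool.and_eq_true, decide_eq_true_eq]
          rw [doneCell_succ i j i' j' hilj]
        rw [this]
      · intro i' j' hi' hj' hc
        refine h4 i' j' hi' hj' ?_
        simp only [Bool.or_eq_true, Bool.and_eq_true, decide_eq_true_eq]
        rw [doneCell_succ i j i' j' hilj] at hc
        tauto
lemma AInv_init (nums queries : List Int) (n : Nat) (m : Int) :
    AInv nums queries n m 0 (n-1) (List.replicate n (List.replicate n (0:Int))) := by
  have hdc : ∀ i' j', j' < n → doneCell 0 (n-1) i' j' = false := by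
    intro i' j' hj'
    simp [doneCell]
    omega
  refine ⟨by simp, ?_, ?_, ?_⟩
  · intro r hr
    rw [List.eq_of_mem_replicate hr]
    simp
  · intro i' j' hi' hj'
    rw [hdc i' j' hj']
    simp [List.getD_eq_getElem?_getD, hi', hj']
  · intro i' j' _ hj' hc
    rw [hdc i' j' hj'] at hc
    exact absurd hc (by simp)

lemma outerA_spec (nums queries : List Int) (n : Nat) (m : Int) (hm : 0 ≤ m) :
    ∀ d i f, n - i = d → i ≤ n → AInv nums queries n m i (n-1) f →
    (∃ f', outerA nums queries n m i f = .ok f' ∧ AInv nums queries n m n (n-1) f')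
    ∨ (outerA nums queries n m i f = .error m
        ∧ ∃ i0 j0, i0 < n ∧ i0 ≤ j0 ∧ j0 < n ∧ Fdp nums queries n m i0 j0 = m) := by
  intro d
  induction d with
  | zero =>
    intro i f hd hin hinv
    have : i = n := by omega
    subst this
    rw [outerA, dif_neg (by omega)]
    exact Or.inl ⟨f, rfl, hinv⟩
  | succ d ih =>
    intro i f hd hin hinv
    have hiln : i < n := by omega
    rw [outerA, dif_pos hiln]
    rcases innerA_spec nums queries n m hm i hiln (n-1-i) (n-1) f (by omega) (by omega)
        (by omega) hinv with ⟨f', hok, hinv'⟩ | ⟨herr, hw⟩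
    · rw [hok]
      exact ih (i+1) f' (by omega) (by omega) hinv'
    · rw [herr]
      exact Or.inr ⟨rfl, hw⟩

lemma AB_eq (nums queries : List Int) :
    maximumProcessableQueries nums queries = maximumProcessableQueries_alt nums queries := by
  have hm : (0:Int) ≤ (queries.length : Int) := by omega
  rw [alt_eq_Fdp]
  unfold maximumProcessableQueries
  show (match outerA nums queries nums.length (queries.length:Int) 0
        (List.replicate nums.length (List.replicate nums.length 0)) with
    | Except.error r => r
    | Except.ok f => (((List.range nums.length).map (fun i =>
          (f.getD i []).getD i 0 +
            (if nums.getD i 0 ≥ queries.getD ((f.getD i []).getD i 0).toNat 0 then (1:Int) else 0))).max?).getD 0)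
    = _
  rcases outerA_spec nums queries nums.length (queries.length : Int) hm nums.length 0
      (List.replicate nums.length (List.replicate nums.length 0)) (by omega) (by omega)
      (AInv_init nums queries nums.length (queries.length : Int))
    with ⟨f, hok, hlen, hrows, hget, hlt⟩ | ⟨herr, i0, j0, hi0, hij0, hj0, hF⟩
  · rw [hok]
    show (((List.range nums.length).map (fun i =>
          (f.getD i []).getD i 0 +
            (if nums.getD i 0 ≥ queries.getD ((f.getD i []).getD i 0).toNat 0 then (1:Int) else 0))).max?).getD 0 = _
    congr 2
    apply List.map_congr_left
    intro i hi
    rw [List.mem_range] at hi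
    have hdone : doneCell nums.length (nums.length - 1) i i = true := by
      simp [doneCell]
      omega
    have hv : (f.getD i []).getD i 0 = Fdp nums queries nums.length (queries.length : Int) i i := by
      rw [hget i i hi hi, hdone]; rfl
    have hvlt := hlt i i hi hi hdone
    rw [hv, stepB_eq_add (hv ▸ hvlt)]
  · rw [herr]
    show (queries.length : Int) = _
    have hdm : Fdp nums queries nums.length (queries.length : Int) i0 i0 = (queries.length : Int) := by
      have h1 := Fdp_diag_ge nums queries nums.length (queries.length : Int) hm i0 j0 hij0 hj0
      have h2 := Fdp_le nums queries nums.length (queries.length : Int) hm i0 i0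
      omega
    have hmax : ((List.range nums.length).map (fun i =>
        stepB queries (queries.length : Int)
          (Fdp nums queries nums.length (queries.length : Int) i i)
          (nums.getD i 0))).max? = some (queries.length : Int) := by
      rw [List.max?_eq_some_iff]
      constructor
      · refine List.mem_map.mpr ⟨i0, List.mem_range.mpr hi0, ?_⟩
        rw [hdm]
        unfold stepB
        rw [if_pos (le_refl _)]
      · intro b hb
        obtain ⟨i, hi, rfl⟩ := List.mem_map.mp hb
        exact stepB_le (Fdp_le nums queries nums.length (queries.length : Int) hm i i)
    rw [hmax]
    rfl

-- ===== VERDICT (by name: the statement is the Claim_ definition above) =====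
theorem maximumProcessableQueries_spec : Claim_equal_maximumProcessableQueries := by
  intro nums queries _ _
  unfold Spec_maximumProcessableQueries
  exact AB_eq nums queries
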